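-- pv_equiv track=rewrite | github.com/Karston02/aoc-2024 | 09 - disk fragmenter/main.py | find_file_info
-- ===== SOURCE A (Python) =====
-- def find_file_info(blocks, file_id):
--     """Find start position and size of a file"""
--     start = None
--     size = 0
--     for i, block in enumerate(blocks):
--         if block == file_id:
--             if start is None:
--                 start = i
--             size += 1
--     return start, size
-- ===== SOURCE B (Python) =====
-- def find_file_info(blocks, file_id):
--     """Find start position and size of a file"""
--     size = blocks.count(file_id)
--     start = blocks.index(file_id) if size else None
--     return start, size
-- ===== Notes on version B (the rewrite author's own statement) =====
-- stated objective: idiomatic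
-- what changed: Replaces the single manual enumerate loop with a None-guard by two built-in scans: size = blocks.count(file_id) and start = blocks.index(file_id) when size is nonzero.
import Mathlib
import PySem

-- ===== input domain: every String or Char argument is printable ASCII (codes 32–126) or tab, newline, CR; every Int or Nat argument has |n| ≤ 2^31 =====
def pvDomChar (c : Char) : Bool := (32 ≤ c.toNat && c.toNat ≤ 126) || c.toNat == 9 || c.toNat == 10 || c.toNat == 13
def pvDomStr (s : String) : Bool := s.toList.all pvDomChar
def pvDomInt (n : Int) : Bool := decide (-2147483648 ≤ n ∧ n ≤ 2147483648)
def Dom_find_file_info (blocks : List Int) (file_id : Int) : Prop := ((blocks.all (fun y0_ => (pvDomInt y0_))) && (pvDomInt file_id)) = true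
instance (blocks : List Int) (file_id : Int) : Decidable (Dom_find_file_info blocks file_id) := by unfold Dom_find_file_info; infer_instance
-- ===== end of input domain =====

-- B computes the same (start, size) by two built-in scans (count, then index when present) instead of A's single manual loop with a None-guard: more idiomatic, same O(n) cost.


-- ===== PORT A =====
-- A's loop body: 'if block == file_id: (if start is None: start = i); size += 1'
def pvStepA (file_id : Int) (st : Option Int × Int) (p : Int × Int) : Option Int × Int :=
  if p.2 == file_id then
    ((match st.1 with | none => some p.1 | some j => some j), st.2 + 1)
  else st

-- one enumerate loop carrying (start, size)
def find_file_info (blocks : List Int) (file_id : Int) : Option Int × Int :=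
  (PySem.List.enumerate blocks).foldl (pvStepA file_id) (none, 0)

-- ===== PORT B =====
-- size = blocks.count(file_id); start = blocks.index(file_id) if size else None
def find_file_info_alt (blocks : List Int) (file_id : Int) : Option Int × Int :=
  let size : Int := (PySem.List.count blocks file_id : Int)
  let start : Option Int :=
    if size ≠ 0 then (PySem.List.index? blocks file_id).map (fun k => (k : Int)) else none
  (start, size)

-- ===== PRECONDITION & SPEC =====
def Spec_find_file_info (blocks : List Int) (file_id : Int) (out : Option Int × Int) : Prop := out = find_file_info_alt blocks file_id
instance (blocks : List Int) (file_id : Int) (out : Option Int × Int) : Decidable (Spec_find_file_info blocks file_id out) := by unfold Spec_find_file_info; infer_instance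

-- ===== CLAIM (what is proved, stated in full; the proofs are below) =====
def Claim_equal_find_file_info : Prop := ∀ (blocks : List Int) (file_id : Int), Dom_find_file_info blocks file_id → Spec_find_file_info blocks file_id (find_file_info blocks file_id)

-- ===== LEMMAS AND PROOFS =====

-- once start is some, it stays; only size keeps counting
theorem pv_foldl_some (file_id : Int) : ∀ (xs : List Int) (s : Int) (j n : Int),
    (PySem.List.enumerate xs s).foldl (pvStepA file_id) (some j, n)
      = (some j, n + (xs.count file_id : Int)) := by
  intro xs
  induction xs with
  | nil => intro s j n; simp [PySem.List.enumerate_nil]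
  | cons x xs ih =>
    intro s j n
    rw [PySem.List.enumerate_cons, List.foldl_cons]
    by_cases h : x = file_id
    · have hs : pvStepA file_id (some j, n) (s, x) = (some j, n + 1) := by
        simp [pvStepA, h]
      rw [hs, ih]
      simp [h]
      ring
    · have hs : pvStepA file_id (some j, n) (s, x) = (some j, n) := by
        simp [pvStepA, h]
      rw [hs, ih]
      simp [h]

-- while start is still None, the loop's result is index? (offset by s) and the count
theorem pv_foldl_none (file_id : Int) : ∀ (xs : List Int) (s : Int) (n : Int),
    (PySem.List.enumerate xs s).foldl (pvStepA file_id) (none, n)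
      = ((PySem.List.index? xs file_id).map (fun k => s + (k : Int)),
         n + (xs.count file_id : Int)) := by
  intro xs
  induction xs with
  | nil =>
    intro s n
    simp [PySem.List.enumerate_nil, PySem.List.index?_eq_idxOf?]
  | cons x xs ih =>
    intro s n
    rw [PySem.List.enumerate_cons, List.foldl_cons]
    by_cases h : x = file_id
    · have hs : pvStepA file_id (none, n) (s, x) = (some s, n + 1) := by
        simp [pvStepA, h]
      subst h
      rw [hs, pv_foldl_some, PySem.List.index?_cons_self]
      simp
      ring
    · have hs : pvStepA file_id (none, n) (s, x) = (none, n) := by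
        simp [pvStepA, h]
      rw [hs, ih, PySem.List.index?_cons_of_ne xs h]
      cases hidx : PySem.List.index? xs file_id <;> simp [h] <;> ring

theorem find_file_info_spec : Claim_equal_find_file_info := by
  intro blocks file_id _
  unfold Spec_find_file_info find_file_info find_file_info_alt
  rw [pv_foldl_none]
  by_cases hm : file_id ∈ blocks
  · have hc : blocks.count file_id ≠ 0 := by
      simpa [List.count_eq_zero] using hm
    simp [hc, PySem.List.count]
  · have hc : blocks.count file_id = 0 := by simpa [List.count_eq_zero] using hm
    have hi : PySem.List.index? blocks file_id = none :=
      (PySem.List.index?_eq_none_iff blocks file_id).mpr hm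
    simp only [PySem.List.index?_eq_idxOf?] at hi
    simp [hi, hc, PySem.List.count]
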